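-- pv_equiv track=rewrite | github.com/enricotomasi/LeetCode_problems | Medium/1578. Minimum Time to Make Rope Colorful.py | minCost
-- ===== SOURCE A (Python) =====
-- from typing import List
--
-- def minCost(colors: str, neededTime: List[int]) -> int:
--     n = len(colors)
--
--     last = 'z'
--     temp = []
--     groups = []
--
--     for i in range(n):
--         if colors[i] == last:
--             temp.append(neededTime[i])
--         else:
--             groups.append(temp)
--             temp = [neededTime[i]]
--             last = colors[i]
--
--     if len(temp) > 0:
--         groups.append(temp)
--
--     ans = 0
--
--     for it in groups:
--         if len(it) <= 1:
--             continue
--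
--         it.sort()
--
--         for i in range(len(it) - 1):
--             ans += it[i]
--
--     return ans
-- ===== SOURCE B (Python) =====
-- def minCost(colors, neededTime):
--     ans = 0
--     run_sum = 0
--     run_max = 0
--     prev = None
--     for c, t in zip(colors, neededTime):
--         if c == prev:
--             run_sum += t
--             if t > run_max:
--                 run_max = t
--         else:
--             ans += run_sum - run_max
--             run_sum = t
--             run_max = t
--             prev = c
--     return ans + run_sum - run_max
-- ===== Notes on version B (the rewrite author's own statement) =====
-- stated objective: faster
-- what changed: A collects each colour run into a list, sorts every run and sums all but its last element; B makes a single pass over zip(colors, neededTime) keeping a running sum and running max per run and adds sum-minus-max at each run boundary, with no intermediate lists and no sorting.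
import Mathlib
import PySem

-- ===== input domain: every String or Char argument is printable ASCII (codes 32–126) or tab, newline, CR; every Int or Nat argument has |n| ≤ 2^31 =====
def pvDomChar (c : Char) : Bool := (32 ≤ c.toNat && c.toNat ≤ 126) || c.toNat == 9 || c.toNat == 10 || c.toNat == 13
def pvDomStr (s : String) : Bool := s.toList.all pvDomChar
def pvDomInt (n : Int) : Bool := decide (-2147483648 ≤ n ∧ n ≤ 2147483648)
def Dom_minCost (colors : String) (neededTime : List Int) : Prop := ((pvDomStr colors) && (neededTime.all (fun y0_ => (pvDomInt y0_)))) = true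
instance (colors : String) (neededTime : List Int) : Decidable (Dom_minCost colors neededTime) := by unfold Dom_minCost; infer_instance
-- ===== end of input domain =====

-- B replaces A's group-collect-then-sort pipeline by a single pass keeping a running
-- sum and running max per colour run (objective: faster, O(n) instead of O(n log n)).

-- ===== PORT A =====
-- A's first loop over range(n): state (last, temp, groups)
def minCost (colors : String) (neededTime : List Int) : Int :=
  let cs := colors.toList
  let n : Int := cs.length
  let st := (PySem.List.pyRange 0 n 1).foldl
    (fun (st : Char × List Int × List (List Int)) i =>
      let last := st.1; let temp := st.2.1; let groups := st.2.2
      let c := PySem.List.pyGetD cs i 'z'          -- colors[i]; 0 ≤ i < n always in range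
      let t := PySem.List.pyGetD neededTime i 0    -- neededTime[i]; in range under Pre_
      if c = last then (last, temp ++ [t], groups)
      else (c, [t], groups ++ [temp]))
    ('z', ([], []))
  let groups := if st.2.1.length > 0 then st.2.2 ++ [st.2.1] else st.2.2
  groups.foldl (fun ans it =>
    if it.length ≤ 1 then ans
    else
      let s := PySem.List.sorted it (fun x => x) false
      (PySem.List.pyRange 0 ((it.length : Int) - 1) 1).foldl
        (fun a i => a + PySem.List.pyGetD s i 0) ans) 0

-- ===== PORT B =====
-- B's single pass over zip(colors, neededTime): state (ans, run_sum, run_max, prev)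
def minCost_alt (colors : String) (neededTime : List Int) : Int :=
  let st := (colors.toList.zip neededTime).foldl
    (fun (st : Int × Int × Int × Option Char) (p : Char × Int) =>
      let ans := st.1; let rs := st.2.1; let rm := st.2.2.1; let prev := st.2.2.2
      if (some p.1 : Option Char) = prev then
        (ans, rs + p.2, if p.2 > rm then p.2 else rm, prev)
      else (ans + rs - rm, p.2, p.2, some p.1))
    (0, (0, (0, none)))
  st.1 + st.2.1 - st.2.2.1

-- ===== PRECONDITION & SPEC =====
-- Pre_ excludes exactly the inputs where A raises IndexError: neededTime shorter than colors.
def Pre_minCost (colors : String) (neededTime : List Int) : Prop :=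
  colors.toList.length ≤ neededTime.length
instance (colors : String) (neededTime : List Int) : Decidable (Pre_minCost colors neededTime) := by unfold Pre_minCost; infer_instance
def pvWitness_minCost : String × List Int := ("aab", [1, 2, 3])

def Spec_minCost (colors : String) (neededTime : List Int) (out : Int) : Prop := out = minCost_alt colors neededTime
instance (colors : String) (neededTime : List Int) (out : Int) : Decidable (Spec_minCost colors neededTime out) := by unfold Spec_minCost; infer_instance

-- ===== CLAIM (what is proved, stated in full; the proofs are below) =====
def Claim_equal_minCost : Prop := ∀ (colors : String) (neededTime : List Int), Dom_minCost colors neededTime → Pre_minCost colors neededTime → Spec_minCost colors neededTime (minCost colors neededTime)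

-- ===== LEMMAS AND PROOFS =====

-- proof-only helpers
def pvTmax : List Int → Int
  | [] => 0
  | h :: t => t.foldl max h

def pvCostGs (gs : List (List Int)) : Int := (gs.map (fun it => it.sum - pvTmax it)).sum

def pvStepA (st : Char × List Int × List (List Int)) (p : Char × Int) :
    Char × List Int × List (List Int) :=
  if p.1 = st.1 then (st.1, st.2.1 ++ [p.2], st.2.2) else (p.1, ([p.2], st.2.2 ++ [st.2.1]))

def pvStepB (st : Int × Int × Int × Option Char) (p : Char × Int) :
    Int × Int × Int × Option Char :=
  if (some p.1 : Option Char) = st.2.2.2 then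
    (st.1, st.2.1 + p.2, if p.2 > st.2.2.1 then p.2 else st.2.2.1, st.2.2.2)
  else (st.1 + st.2.1 - st.2.2.1, p.2, p.2, some p.1)

lemma pvTmax_append_singleton (temp : List Int) (t : Int) (h : temp ≠ []) :
    pvTmax (temp ++ [t]) = if t > pvTmax temp then t else pvTmax temp := by
  cases temp with
  | nil => exact absurd rfl h
  | cons a l =>
      simp only [pvTmax, List.cons_append, List.foldl_append, List.foldl_cons, List.foldl_nil]
      rcases le_total (l.foldl max a) t with hle | hle
      · rcases lt_or_eq_of_le hle with hlt | heq
        · simp [max_eq_right hle, hlt]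
        · simp [heq]
      · simp [max_eq_left hle, not_lt.mpr hle]

lemma pvLe_tmax (h : Int) (t : List Int) : ∀ y ∈ h :: t, y ≤ pvTmax (h :: t) := by
  intro y hy
  rcases List.mem_cons.mp hy with rfl | hyt
  · exact (PySem.List.le_foldl_max t y).1
  · exact (PySem.List.le_foldl_max t h).2 y hyt

lemma pvTmax_mem (h : Int) (t : List Int) : pvTmax (h :: t) ∈ h :: t := by
  rcases PySem.List.foldl_max_mem t h with heq | hmem
  · rw [pvTmax, heq]; exact List.mem_cons_self
  · exact List.mem_cons_of_mem _ hmem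

-- the cost A's second loop assigns to one group equals (sum − max)
lemma pvCostBody_eq (ans : Int) (it : List Int) :
    (if it.length ≤ 1 then ans
     else
       (PySem.List.pyRange 0 ((it.length : Int) - 1) 1).foldl
         (fun a i => a + PySem.List.pyGetD (PySem.List.sorted it (fun x => x) false) i 0) ans)
    = ans + (it.sum - pvTmax it) := by
  match it with
  | [] => simp [pvTmax]
  | [x] => simp [pvTmax]
  | x :: y :: l =>
    set it := x :: y :: l with hit
    have hlen2 : 2 ≤ it.length := by simp [hit]
    rw [if_neg (by omega)]
    set s := PySem.List.sorted it (fun x => x) false with hs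
    have hperm : s.Perm it := PySem.List.sorted_perm it (fun x => x) false
    have hslen : s.length = it.length := hperm.length_eq
    have hsne : s ≠ [] := by
      intro hnil; rw [hnil] at hslen; simp at hslen; omega
    set m := s.getLast hsne with hm
    have hsplit : s.dropLast ++ [m] = s := List.dropLast_append_getLast hsne
    have hdlen : s.dropLast.length = it.length - 1 := by
      simp [List.length_dropLast, hslen]
    have hb : (it.length : Int) - 1 = (s.dropLast.length : Int) := by
      rw [hdlen]; omega
    rw [PySem.List.foldl_add]
    have hmapcongr :
        (PySem.List.pyRange 0 ((it.length : Int) - 1) 1).map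
            (fun i => PySem.List.pyGetD s i 0)
          = (PySem.List.pyRange 0 ((s.dropLast.length : Int)) 1).map
              (fun i => PySem.List.pyGetD s.dropLast i 0) := by
      rw [hb]
      refine List.map_congr_left ?_
      intro i hi
      obtain ⟨hi0, hilt⟩ := (PySem.List.mem_pyRange_one).mp hi
      have hiltn : i.toNat < s.dropLast.length := by omega
      rw [PySem.List.pyGetD_eq_getElem s 0 hi0 (by omega),
          PySem.List.pyGetD_eq_getElem s.dropLast 0 hi0 (by omega)]
      exact (List.getElem_dropLast hiltn).symm
    rw [hmapcongr, PySem.List.map_pyGetD_pyRange_zero' s.dropLast 0]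
    have hsum : s.dropLast.sum = it.sum - m := by
      have h1 : s.sum = s.dropLast.sum + m := by
        conv_lhs => rw [← hsplit]
        simp
      have hsit : s.sum = it.sum := hperm.sum_eq
      omega
    have hmmax : m = pvTmax it := by
      have hmem_m : m ∈ it := hperm.mem_iff.mp (List.getLast_mem hsne)
      have h1 : m ≤ pvTmax it := by
        rw [hit] at hmem_m ⊢; exact pvLe_tmax x (y :: l) m hmem_m
      have hpw : s.Pairwise (fun a b => a ≤ b) := by
        have := PySem.List.sorted_pairwise it (fun x => x) (κ := Int)
        simpa [hs] using this
      have h2 : pvTmax it ≤ m := by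
        have hmem_t : pvTmax it ∈ s := hperm.mem_iff.mpr (by rw [hit]; exact pvTmax_mem x (y :: l))
        rw [← hsplit] at hmem_t hpw
        rcases List.mem_append.mp hmem_t with hin | hin
        · exact (List.pairwise_append.mp hpw).2.2 _ hin m List.mem_cons_self
        · simp at hin; omega
      omega
    omega

-- A's second loop over the groups computes pvCostGs
lemma pvLoop2_eq (gs : List (List Int)) (a : Int) :
    gs.foldl (fun ans it =>
      if it.length ≤ 1 then ans
      else
        (PySem.List.pyRange 0 ((it.length : Int) - 1) 1).foldl
          (fun a i => a + PySem.List.pyGetD (PySem.List.sorted it (fun x => x) false) i 0) ans) a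
    = a + pvCostGs gs := by
  refine (PySem.List.foldl_congr_mem gs _ (fun ans it => ans + (it.sum - pvTmax it)) a
    (fun acc x _ => pvCostBody_eq acc x)).trans ?_
  rw [PySem.List.foldl_add]
  rfl

lemma pvCostGs_append_singleton (gs : List (List Int)) (it : List Int) :
    pvCostGs (gs ++ [it]) = pvCostGs gs + (it.sum - pvTmax it) := by
  simp [pvCostGs]

-- the index loop over range(n) is the fold over zip(colors, neededTime)
lemma pvRangeFold_eq_zipFold {σ : Type} (cs : List Char) (nt : List Int)
    (h : cs.length ≤ nt.length) (f : σ → Char → Int → σ) (init : σ) :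
    (PySem.List.pyRange 0 (cs.length : Int) 1).foldl
        (fun st i => f st (PySem.List.pyGetD cs i 'z') (PySem.List.pyGetD nt i 0)) init
    = (cs.zip nt).foldl (fun st p => f st p.1 p.2) init := by
  have hz : (cs.zip nt).length = cs.length := by
    rw [List.length_zip]; omega
  have hb : (cs.length : Int) = ((cs.zip nt).length : Int) := by rw [hz]
  rw [hb,
      ← PySem.List.foldl_pyRange_zero_pyGetD' (cs.zip nt) ('z', (0 : Int))
          (fun st p => f st p.1 p.2) init]
  refine PySem.List.foldl_congr_mem _ _ _ _ ?_
  intro acc i hi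
  obtain ⟨hi0, hilt⟩ := (PySem.List.mem_pyRange_one).mp hi
  rw [PySem.List.pyGetD_eq_getElem cs 'z' hi0 (by omega),
      PySem.List.pyGetD_eq_getElem nt 0 hi0 (by omega),
      PySem.List.pyGetD_eq_getElem (cs.zip nt) ('z', (0 : Int)) hi0 (by omega)]
  rw [List.getElem_zip]

-- the joint invariant: A's grouping state and B's running state carry the same cost
lemma pvMain_loop : ∀ (ps : List (Char × Int)) (last : Char) (temp : List Int)
    (groups : List (List Int)) (ans rs rm : Int) (prev : Option Char),
    ans = pvCostGs groups → rs = temp.sum → rm = pvTmax temp →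
    (temp = [] → prev = none) → (temp ≠ [] → prev = some last) →
    pvCostGs
      (if (ps.foldl pvStepA (last, temp, groups)).2.1.length > 0 then
        (ps.foldl pvStepA (last, temp, groups)).2.2 ++ [(ps.foldl pvStepA (last, temp, groups)).2.1]
      else (ps.foldl pvStepA (last, temp, groups)).2.2)
    = (ps.foldl pvStepB (ans, rs, rm, prev)).1 + (ps.foldl pvStepB (ans, rs, rm, prev)).2.1
        - (ps.foldl pvStepB (ans, rs, rm, prev)).2.2.1 := by
  intro ps
  induction ps with
  | nil =>
      intro last temp groups ans rs rm prev h1 h2 h3 h4 h5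
      simp only [List.foldl_nil]
      cases temp with
      | nil => simp [h1, h2, h3, pvTmax]
      | cons a l =>
          simp only [List.length_cons]
          rw [if_pos (by omega)]
          rw [pvCostGs_append_singleton]
          omega
  | cons p rest ih =>
      intro last temp groups ans rs rm prev h1 h2 h3 h4 h5
      simp only [List.foldl_cons]
      by_cases htemp : temp = []
      · subst htemp
        have hprev : prev = none := h4 rfl
        rw [show pvStepB (ans, rs, rm, prev) p = (ans + rs - rm, p.2, p.2, some p.1) from by
          rw [pvStepB, hprev]; simp]
        by_cases hc : p.1 = last
        · rw [show pvStepA (last, ([] : List Int), groups) p = (last, [p.2], groups) from by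
            rw [pvStepA]; simp [hc]]
          exact ih last [p.2] groups (ans + rs - rm) p.2 p.2 (some p.1)
            (by rw [h1, h2, h3]; simp [pvTmax])
            (by simp) (by simp [pvTmax])
            (by intro hx; exact absurd hx (by simp))
            (by intro _; rw [hc])
        · rw [show pvStepA (last, ([] : List Int), groups) p
              = (p.1, [p.2], groups ++ [[]]) from by rw [pvStepA]; simp [hc]]
          exact ih p.1 [p.2] (groups ++ [[]]) (ans + rs - rm) p.2 p.2 (some p.1)
            (by rw [h1, h2, h3, pvCostGs_append_singleton]; simp [pvTmax])
            (by simp) (by simp [pvTmax])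
            (by intro hx; exact absurd hx (by simp))
            (by intro _; rfl)
      · have hprev : prev = some last := h5 htemp
        by_cases hc : p.1 = last
        · rw [show pvStepB (ans, rs, rm, prev)
              p = (ans, rs + p.2, if p.2 > rm then p.2 else rm, prev) from by
            rw [pvStepB, hprev]; simp [hc]]
          rw [show pvStepA (last, temp, groups) p = (last, temp ++ [p.2], groups) from by
            rw [pvStepA]; simp [hc]]
          exact ih last (temp ++ [p.2]) groups ans (rs + p.2)
            (if p.2 > rm then p.2 else rm) prev
            h1 (by rw [h2]; simp)
            (by rw [h3, pvTmax_append_singleton temp p.2 htemp])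
            (by intro hx; exact absurd hx (by simp))
            (by intro _; exact hprev)
        · rw [show pvStepB (ans, rs, rm, prev) p = (ans + rs - rm, p.2, p.2, some p.1) from by
            rw [pvStepB, hprev]; simp [hc]]
          rw [show pvStepA (last, temp, groups) p = (p.1, [p.2], groups ++ [temp]) from by
            rw [pvStepA]; simp [hc]]
          exact ih p.1 [p.2] (groups ++ [temp]) (ans + rs - rm) p.2 p.2 (some p.1)
            (by rw [h1, h2, h3, pvCostGs_append_singleton]; ring)
            (by simp) (by simp [pvTmax])
            (by intro hx; exact absurd hx (by simp))
            (by intro _; rfl)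

-- ===== VERDICT (by name: the statement is the Claim_ definition above) =====
theorem minCost_spec : Claim_equal_minCost := by
  intro colors neededTime _ hpre
  unfold Spec_minCost
  unfold Pre_minCost at hpre
  show minCost colors neededTime = minCost_alt colors neededTime
  have h0 :
      (PySem.List.pyRange 0 (colors.toList.length : Int) 1).foldl
          (fun (st : Char × List Int × List (List Int)) i =>
            let last := st.1; let temp := st.2.1; let groups := st.2.2
            let c := PySem.List.pyGetD colors.toList i 'z'
            let t := PySem.List.pyGetD neededTime i 0
            if c = last then (last, temp ++ [t], groups)
            else (c, [t], groups ++ [temp]))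
          ('z', ([], []))
      = (colors.toList.zip neededTime).foldl pvStepA ('z', ([], [])) :=
    pvRangeFold_eq_zipFold colors.toList neededTime hpre
      (fun st c t => pvStepA st (c, t)) ('z', ([], []))
  rw [minCost, minCost_alt]
  simp only []
  rw [h0, pvLoop2_eq, zero_add]
  exact pvMain_loop (colors.toList.zip neededTime) 'z' [] [] 0 0 0 none
    (by simp [pvCostGs]) (by simp) (by simp [pvTmax])
    (fun _ => rfl) (fun hx => absurd rfl hx)
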